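-- pv_equiv track=rewrite | github.com/tigerjiholee/ACC---Problem-Solving | 백준/Silver/24495. Non－Transitive Dice/Non－Transitive Dice.py | beat
-- ===== SOURCE A (Python) =====
-- def beat(a,b):
--     count = [0,0]
--     for i in a:
--         for j in b:
--             count[0] += 1 if i>j else 0
--             count[1] += 1 if i<j else 0
--     if count[0] > count[1]:
--         return 0
--     elif count[1] > count[0]:
--         return 1
--     else:
--         return -1
-- ===== SOURCE B (Python) =====
-- def _lb(bs, x):
--     # bisect_left written out: first index with bs[idx] >= x
--     lo, hi = 0, len(bs)
--     while lo < hi: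
--         mid = (lo + hi) // 2
--         if bs[mid] < x:
--             lo = mid + 1
--         else:
--             hi = mid
--     return lo
--
--
-- def _ub(bs, x):
--     # bisect_right written out: first index with bs[idx] > x
--     lo, hi = 0, len(bs)
--     while lo < hi:
--         mid = (lo + hi) // 2
--         if x < bs[mid]:
--             hi = mid
--         else:
--             lo = mid + 1
--     return lo
--
--
-- def beat(a, b):
--     bs = sorted(b)
--     wins = 0
--     losses = 0
--     for i in a:
--         wins += _lb(bs, i)
--         losses += len(bs) - _ub(bs, i)
--     if wins > losses:
--         return 0
--     if losses > wins:
--         return 1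
--     return -1
-- ===== Notes on version B (the rewrite author's own statement) =====
-- stated objective: faster
-- what changed: Replaces the O(n*m) nested scan with sorting b once and, per face of a, two binary searches (hand-written bisect_left/bisect_right) that count the strictly smaller and strictly larger faces.
import Mathlib
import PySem

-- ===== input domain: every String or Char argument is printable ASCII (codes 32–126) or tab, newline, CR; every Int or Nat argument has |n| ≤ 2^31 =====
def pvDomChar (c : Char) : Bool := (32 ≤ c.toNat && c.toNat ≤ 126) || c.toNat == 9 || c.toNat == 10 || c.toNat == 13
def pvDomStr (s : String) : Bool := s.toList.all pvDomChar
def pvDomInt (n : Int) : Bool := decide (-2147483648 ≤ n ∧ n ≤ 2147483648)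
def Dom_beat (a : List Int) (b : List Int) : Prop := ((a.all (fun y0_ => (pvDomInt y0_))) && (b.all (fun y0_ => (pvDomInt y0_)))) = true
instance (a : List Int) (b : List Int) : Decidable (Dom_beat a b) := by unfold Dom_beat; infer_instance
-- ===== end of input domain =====

-- B sorts b once and counts smaller/larger faces per element of a with two binary searches
-- (hand-written bisect_left / bisect_right) instead of A's nested O(n*m) double scan.


-- ===== PORT A =====
def beat (a : List Int) (b : List Int) : Int :=
  let count : Int × Int :=
    a.foldl (fun (c : Int × Int) i =>
      b.foldl (fun (c : Int × Int) j =>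
        (c.1 + (if i > j then 1 else 0), c.2 + (if i < j then 1 else 0))) c)
      (0, 0)
  if count.1 > count.2 then 0
  else if count.2 > count.1 then 1
  else -1

-- ===== PORT B =====
-- Source B's _lb/_ub are the standard lo/hi binary-search loops; they are exactly
-- PySem.List.bisectLeft / bisectRight (same loop, same midpoint, same tests).
def beat_alt (a : List Int) (b : List Int) : Int :=
  let bs := PySem.List.sorted b (fun x => x) false
  let wl : Nat × Nat :=
    a.foldl (fun (p : Nat × Nat) i =>
      (p.1 + PySem.List.bisectLeft bs i,
       p.2 + (bs.length - PySem.List.bisectRight bs i))) (0, 0)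
  if (wl.1 : Int) > (wl.2 : Int) then 0
  else if (wl.2 : Int) > (wl.1 : Int) then 1
  else -1

-- ===== PRECONDITION & SPEC =====
def Spec_beat (a : List Int) (b : List Int) (out : Int) : Prop := out = beat_alt a b
instance (a : List Int) (b : List Int) (out : Int) : Decidable (Spec_beat a b out) := by unfold Spec_beat; infer_instance

-- ===== CLAIM (what is proved, stated in full; the proofs are below) =====
def Claim_equal_beat : Prop := ∀ (a : List Int) (b : List Int), Dom_beat a b → Spec_beat a b (beat a b)

-- ===== LEMMAS AND PROOFS =====

-- a list whose predicate holds exactly on the first r positions has countP = r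
theorem countP_of_split (p : Int → Bool) (bs : List Int) (r : Nat)
    (hr : r ≤ bs.length)
    (h1 : ∀ (j : Nat) (hj : j < bs.length), j < r → p bs[j])
    (h2 : ∀ (j : Nat) (hj : j < bs.length), r ≤ j → ¬ p bs[j]) :
    bs.countP p = r := by
  induction bs generalizing r with
  | nil => simpa using (Nat.le_zero.mp (by simpa using hr)).symm
  | cons x t ih =>
    cases r with
    | zero =>
      have hx : ¬ p x := by simpa using h2 0 (by simp) (Nat.zero_le _)
      have ht : t.countP p = 0 := by
        apply ih 0 (Nat.zero_le _) (by omega)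
        intro j hj _
        simpa using h2 (j + 1) (by simpa using Nat.succ_lt_succ hj) (Nat.zero_le _)
      simp [hx, ht]
    | succ r' =>
      have hx : p x := by simpa using h1 0 (by simp) (Nat.succ_pos _)
      have ht : t.countP p = r' := by
        apply ih r' (by simpa using hr)
        · intro j hj hjr
          simpa using h1 (j + 1) (by simpa using Nat.succ_lt_succ hj) (Nat.succ_lt_succ hjr)
        · intro j hj hjr
          simpa using h2 (j + 1) (by simpa using Nat.succ_lt_succ hj) (Nat.succ_le_succ hjr)
      simp [hx, ht]

theorem bisectLeft_eq_countP (bs : List Int) (x : Int)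
    (hs : List.Pairwise (fun u v => u ≤ v) bs) :
    PySem.List.bisectLeft bs x = bs.countP (fun j => decide (j < x)) := by
  obtain ⟨hle, h1, h2⟩ := PySem.List.bisectLeft_spec bs x hs
  exact (countP_of_split _ bs _ hle
    (fun j hj hjr => by simpa using h1 j hj hjr)
    (fun j hj hjr => by simpa using not_lt.mpr (h2 j hj hjr))).symm

theorem bisectRight_eq_countP (bs : List Int) (x : Int)
    (hs : List.Pairwise (fun u v => u ≤ v) bs) :
    PySem.List.bisectRight bs x = bs.countP (fun j => decide (j ≤ x)) := by
  obtain ⟨hle, h1, h2⟩ := PySem.List.bisectRight_spec bs x hs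
  exact (countP_of_split _ bs _ hle
    (fun j hj hjr => by simpa using h1 j hj hjr)
    (fun j hj hjr => by simpa using not_le.mpr (h2 j hj hjr))).symm

theorem length_sub_countP_le (bs : List Int) (x : Int) :
    bs.length - bs.countP (fun j => decide (j ≤ x)) = bs.countP (fun j => decide (x < j)) := by
  have h := List.length_eq_countP_add_countP (l := bs) (p := fun j => decide (j ≤ x))
  have hc : bs.countP (fun a => decide ¬decide (a ≤ x) = true) = bs.countP (fun j => decide (x < j)) := by
    apply List.countP_congr
    intro j _
    simp [not_le]
  rw [hc] at h
  omega

-- A's inner loop over b adds the two comparison counts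
theorem innerA_eq (b : List Int) (i : Int) (c : Int × Int) :
    b.foldl (fun (c : Int × Int) j =>
        (c.1 + (if i > j then 1 else 0), c.2 + (if i < j then 1 else 0))) c
      = (c.1 + (b.countP (fun j => decide (j < i)) : Int),
         c.2 + (b.countP (fun j => decide (i < j)) : Int)) := by
  induction b generalizing c with
  | nil => simp
  | cons x t ih =>
    simp only [List.foldl_cons, ih, List.countP_cons, gt_iff_lt, decide_eq_true_eq,
      Prod.mk.injEq]
    constructor <;> (split_ifs <;> push_cast <;> ring)

-- the two outer folds track the same pair of counts
theorem fold_eq (b : List Int) (a : List Int) (c : Int × Int) (p : Nat × Nat)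
    (hc1 : c.1 = (p.1 : Int)) (hc2 : c.2 = (p.2 : Int)) :
    (a.foldl (fun (c : Int × Int) i =>
        b.foldl (fun (c : Int × Int) j =>
          (c.1 + (if i > j then 1 else 0), c.2 + (if i < j then 1 else 0))) c) c)
      = (((a.foldl (fun (p : Nat × Nat) i =>
            (p.1 + PySem.List.bisectLeft (PySem.List.sorted b (fun x => x) false) i,
             p.2 + ((PySem.List.sorted b (fun x => x) false).length -
                    PySem.List.bisectRight (PySem.List.sorted b (fun x => x) false) i))) p).1 : Int),
         ((a.foldl (fun (p : Nat × Nat) i =>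
            (p.1 + PySem.List.bisectLeft (PySem.List.sorted b (fun x => x) false) i,
             p.2 + ((PySem.List.sorted b (fun x => x) false).length -
                    PySem.List.bisectRight (PySem.List.sorted b (fun x => x) false) i))) p).2 : Int)) := by
  set bs := PySem.List.sorted b (fun x => x) false with hbs
  have hperm : bs.Perm b := PySem.List.sorted_perm b (fun x => x) false
  have hpair : List.Pairwise (fun u v : Int => u ≤ v) bs := by
    simpa using PySem.List.sorted_pairwise b (fun x => x)
  induction a generalizing c p with
  | nil => simp [Prod.ext_iff, hc1, hc2]
  | cons i t ih =>
    rw [List.foldl_cons, List.foldl_cons, innerA_eq]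
    apply ih
    · simp only [hc1]
      push_cast
      congr 1
      rw [bisectLeft_eq_countP bs i hpair, hperm.countP_eq]
    · simp only [hc2]
      push_cast
      congr 1
      rw [bisectRight_eq_countP bs i hpair, length_sub_countP_le, hperm.countP_eq]

-- ===== VERDICT (by name: the statement is the Claim_ definition above) =====
theorem beat_spec : Claim_equal_beat := by
  intro a b _
  unfold Spec_beat beat beat_alt
  rw [fold_eq b a (0, 0) (0, 0) (by simp) (by simp)]
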